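-- pv_equiv track=rewrite | github.com/alexaltair/k-complexity | dovetail.py | int_to_binary_string
-- ===== SOURCE A (Python) =====
-- def int_to_binary_string(integer):
--     if integer < 0:
--         raise BaseException("Integer should be positive")
--
--     string = ''
--     while integer > 0:
--         if integer % 2:
--             string = '0' + string
--             integer = integer - 1
--             integer = integer//2
--         else:
--             string = '1' + string
--             integer = integer//2
--             integer = integer - 1
--
--     return string
-- ===== SOURCE B (Python) =====
-- def int_to_binary_string(integer):
--     if integer < 0:
--         raise BaseException("Integer should be positive")
--     # bijective binary of v is the binary of v+1 with the leading bit (and '0b') removed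
--     return bin(integer + 1)[3:]
-- ===== Notes on version B (the rewrite author's own statement) =====
-- stated objective: simpler
-- what changed: Replaced the per-bit prepend loop with a closed-form conversion: the bijective-binary code of v is bin(v+1) with the '0b' prefix and leading bit sliced off.
import Mathlib
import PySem

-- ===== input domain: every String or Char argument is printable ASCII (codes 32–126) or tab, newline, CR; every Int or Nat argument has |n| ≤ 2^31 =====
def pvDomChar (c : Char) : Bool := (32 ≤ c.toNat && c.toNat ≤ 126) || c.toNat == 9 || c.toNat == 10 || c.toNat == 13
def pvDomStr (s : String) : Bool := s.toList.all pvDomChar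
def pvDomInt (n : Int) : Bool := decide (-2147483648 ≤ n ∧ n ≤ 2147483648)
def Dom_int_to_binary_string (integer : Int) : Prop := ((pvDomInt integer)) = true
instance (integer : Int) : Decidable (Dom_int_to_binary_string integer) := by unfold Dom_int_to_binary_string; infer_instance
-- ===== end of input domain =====

-- B replaces A's per-bit prepend loop by a closed-form conversion (bin(v+1) minus its three-character prefix); objective: simpler.

-- ===== PORT A =====
-- the while loop of A, state = (integer, string as List Char); fuel is only a totality
-- guard (integer strictly decreases each iteration, so fuel = integer.toNat + 1 is never exhausted)
def i2bLoopA (fuel : Nat) (integer : Int) (string : List Char) : List Char :=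
  match fuel with
  | 0 => string
  | fuel + 1 =>
    if integer > 0 then
      if PySem.Int.mod integer 2 ≠ 0 then
        i2bLoopA fuel (PySem.Int.floordiv (integer - 1) 2) ('0' :: string)
      else
        i2bLoopA fuel (PySem.Int.floordiv integer 2 - 1) ('1' :: string)
    else string

def int_to_binary_string (integer : Int) : String :=
  -- for integer < 0 Python raises; Pre_ excludes those inputs
  String.mk (i2bLoopA (integer.toNat + 1) integer [])

-- ===== PORT B =====
-- bin(n) for n ≥ 1: ['0','b'] ++ binary digits, MSB first
def pyBinDigits (n : Nat) : List Char :=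
  if n = 0 then [] else pyBinDigits (n / 2) ++ [if n % 2 = 1 then '1' else '0']

def int_to_binary_string_alt (integer : Int) : String :=
  -- bin(integer + 1)[3:]
  String.mk ((['0', 'b'] ++ pyBinDigits (integer + 1).toNat).drop 3)

-- ===== PRECONDITION & SPEC =====
-- A raises BaseException on negative input; Pre_ excludes exactly those
def Pre_int_to_binary_string (integer : Int) : Prop := 0 ≤ integer
instance (integer : Int) : Decidable (Pre_int_to_binary_string integer) := by unfold Pre_int_to_binary_string; infer_instance
def pvWitness_int_to_binary_string : Int := 6

def Spec_int_to_binary_string (integer : Int) (out : String) : Prop := out = int_to_binary_string_alt integer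
instance (integer : Int) (out : String) : Decidable (Spec_int_to_binary_string integer out) := by unfold Spec_int_to_binary_string; infer_instance

-- ===== CLAIM (what is proved, stated in full; the proofs are below) =====
def Claim_equal_int_to_binary_string : Prop := ∀ (integer : Int), Dom_int_to_binary_string integer → Pre_int_to_binary_string integer → Spec_int_to_binary_string integer (int_to_binary_string integer)

-- ===== LEMMAS AND PROOFS =====

lemma pyBinDigits_ne_nil {n : Nat} (h : n ≠ 0) : pyBinDigits n ≠ [] := by
  rw [pyBinDigits]; simp [h]

-- core invariant: A's loop on a nonnegative value prepends exactly the tail of bin(n+1)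
lemma i2bLoopA_eq (n : Nat) : ∀ (fuel : Nat), n ≤ fuel → ∀ (s : List Char),
    i2bLoopA fuel (n : Int) s = (pyBinDigits (n + 1)).drop 1 ++ s := by
  induction n using Nat.strong_induction_on with
  | _ n ih =>
    intro fuel hfuel s
    by_cases hn : 0 < n
    · obtain ⟨fuel, rfl⟩ : ∃ f, fuel = f + 1 := ⟨fuel - 1, by omega⟩
      rw [i2bLoopA]
      rw [if_pos (by exact_mod_cast hn)]
      by_cases hodd : n % 2 = 1
      · have hmod : PySem.Int.mod (n : Int) 2 = 1 := by
          rw [PySem.Int.mod_eq_emod_of_pos (by omega)]; omega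
        rw [if_pos (by rw [hmod]; decide)]
        have hdiv : PySem.Int.floordiv ((n : Int) - 1) 2 = (((n - 1) / 2 : Nat) : Int) := by
          rw [PySem.Int.floordiv_eq_ediv_of_pos (by omega)]; omega
        rw [hdiv, ih ((n - 1) / 2) (by omega) fuel (by omega)]
        -- n+1 is even: bin(n+1) = bin((n+1)/2) ++ ['0'], and (n-1)/2 + 1 = (n+1)/2
        have hrec : pyBinDigits (n + 1) = pyBinDigits ((n + 1) / 2) ++ ['0'] := by
          rw [pyBinDigits]; simp
          omega
        have harg : (n - 1) / 2 + 1 = (n + 1) / 2 := by omega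
        rw [harg, hrec,
            List.drop_append_of_le_length (by
              have := pyBinDigits_ne_nil (n := (n + 1) / 2) (by omega)
              cases h : pyBinDigits ((n + 1) / 2) with
              | nil => exact absurd h this
              | cons a l => simp)]
        simp
      · have heven : n % 2 = 0 := by omega
        have hmod : PySem.Int.mod (n : Int) 2 = 0 := by
          rw [PySem.Int.mod_eq_emod_of_pos (by omega)]; omega
        rw [if_neg (by rw [hmod]; simp)]
        have hdiv : PySem.Int.floordiv (n : Int) 2 - 1 = ((n / 2 - 1 : Nat) : Int) := by
          rw [PySem.Int.floordiv_eq_ediv_of_pos (by omega)]; omega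
        rw [hdiv, ih (n / 2 - 1) (by omega) fuel (by omega)]
        -- n+1 is odd: bin(n+1) = bin((n+1)/2) ++ ['1'], and n/2 - 1 + 1 = (n+1)/2
        have hrec : pyBinDigits (n + 1) = pyBinDigits ((n + 1) / 2) ++ ['1'] := by
          rw [pyBinDigits]; simp
          omega
        have harg : n / 2 - 1 + 1 = (n + 1) / 2 := by omega
        rw [harg, hrec,
            List.drop_append_of_le_length (by
              have := pyBinDigits_ne_nil (n := (n + 1) / 2) (by omega)
              cases h : pyBinDigits ((n + 1) / 2) with
              | nil => exact absurd h this
              | cons a l => simp)]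
        simp
    · obtain rfl : n = 0 := by omega
      cases fuel with
      | zero => simp [i2bLoopA, pyBinDigits]
      | succ f => simp [i2bLoopA, pyBinDigits]

-- ===== VERDICT (by name: the statement is the Claim_ definition above) =====
theorem int_to_binary_string_spec : Claim_equal_int_to_binary_string := by
  intro integer _ hpre
  unfold Pre_int_to_binary_string at hpre
  unfold Spec_int_to_binary_string int_to_binary_string int_to_binary_string_alt
  obtain ⟨n, rfl⟩ : ∃ n : Nat, integer = (n : Int) := ⟨integer.toNat, by omega⟩
  rw [i2bLoopA_eq n (((n : Int).toNat + 1)) (by omega) []]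
  have h1 : ((n : Int) + 1).toNat = n + 1 := by omega
  rw [h1]
  -- drop 3 of ['0','b'] ++ ds = drop 1 ds
  cases h : pyBinDigits (n + 1) with
  | nil => exact absurd h (pyBinDigits_ne_nil (by omega))
  | cons a l => simp
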